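-- pv_equiv track=rewrite | github.com/Balcalli17/Ing-Sistemas-UPEA-by-Balcalli | Practicando la Cabeza/20-09-2025/PyBalcalli - copia/3ejercicio formING.py | moverv
-- ===== SOURCE A (Python) =====
-- def moverv(vec,tam):
--     p1 = tam // 3
--     p2 = tam - p1
--     cont = 1
--     for i in range(0,p1,1):
--         vec[i] = cont
--         cont = cont + 1
--         vec[p1] = cont
--         cont = cont + 1
--         vec[p2] = cont
--         cont = cont + 1
--         p1 = p1 + 1
--         p2 = p2 + 1
--     return vec
-- ===== SOURCE B (Python) =====
-- def moverv(vec, tam):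
--     # Mutates vec in place like the original; return-value equivalent.
--     n = tam // 3
--     for j in range(n):
--         vec[j] = 3 * j + 1
--     for j in range(n):
--         vec[n + j] = 3 * j + 2
--     for j in range(n):
--         vec[tam - n + j] = 3 * j + 3
--     return vec
-- ===== Notes on version B (the rewrite author's own statement) =====
-- stated objective: alternative
-- what changed: Replaces the single interleaved loop with a threaded counter `cont` and two moving pointers p1/p2 by three segment-by-segment loops that write each cell directly from a closed-form value (3*j+1, 3*j+2, 3*j+3).
import Mathlib
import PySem

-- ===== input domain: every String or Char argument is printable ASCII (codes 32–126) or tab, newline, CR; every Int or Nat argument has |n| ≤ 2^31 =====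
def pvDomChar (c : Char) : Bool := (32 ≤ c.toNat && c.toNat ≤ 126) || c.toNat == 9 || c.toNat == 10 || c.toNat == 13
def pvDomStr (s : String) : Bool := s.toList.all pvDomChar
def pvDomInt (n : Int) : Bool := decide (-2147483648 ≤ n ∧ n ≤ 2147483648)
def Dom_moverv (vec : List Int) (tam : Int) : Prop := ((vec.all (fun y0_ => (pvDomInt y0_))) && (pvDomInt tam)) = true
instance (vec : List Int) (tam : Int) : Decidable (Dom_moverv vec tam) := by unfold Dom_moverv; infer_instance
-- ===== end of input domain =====

-- B replaces A's single interleaved loop (threaded counter cont, moving pointers p1/p2) by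
-- three segment loops writing closed-form values; both Pythons mutate vec in place — the
-- equivalence proved here is about the returned list.

-- ===== PORT A =====
def moverv (vec : List Int) (tam : Int) : List Int :=
  let p1 := PySem.Int.floordiv tam 3
  let p2 := tam - p1
  ((PySem.List.pyRange 0 p1 1).foldl
    (fun (s : List Int × Int × Int × Int) (i : Int) =>
      let v := PySem.List.pySetD s.1 i s.2.1
      let v := PySem.List.pySetD v s.2.2.1 (s.2.1 + 1)
      let v := PySem.List.pySetD v s.2.2.2 (s.2.1 + 2)
      (v, s.2.1 + 3, s.2.2.1 + 1, s.2.2.2 + 1))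
    (vec, 1, p1, p2)).1

-- ===== PORT B =====
def moverv_alt (vec : List Int) (tam : Int) : List Int :=
  let n := PySem.Int.floordiv tam 3
  let v1 := (PySem.List.pyRange 0 n 1).foldl (fun v j => PySem.List.pySetD v j (3 * j + 1)) vec
  let v2 := (PySem.List.pyRange 0 n 1).foldl (fun v j => PySem.List.pySetD v (n + j) (3 * j + 2)) v1
  (PySem.List.pyRange 0 n 1).foldl (fun v j => PySem.List.pySetD v (tam - n + j) (3 * j + 3)) v2

-- ===== PRECONDITION & SPEC =====
-- Pre_ excludes exactly the inputs where Python A raises IndexError (tam ≥ 3 and tam > len(vec)).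
def Pre_moverv (vec : List Int) (tam : Int) : Prop := tam < 3 ∨ tam ≤ (vec.length : Int)
instance (vec : List Int) (tam : Int) : Decidable (Pre_moverv vec tam) := by unfold Pre_moverv; infer_instance
def pvWitness_moverv : List Int × Int := ([7, 7, 7, 7, 7, 7, 7], 7)

def Spec_moverv (vec : List Int) (tam : Int) (out : List Int) : Prop := out = moverv_alt vec tam
instance (vec : List Int) (tam : Int) (out : List Int) : Decidable (Spec_moverv vec tam out) := by unfold Spec_moverv; infer_instance

-- ===== CLAIM (what is proved, stated in full; the proofs are below) =====
def Claim_equal_moverv : Prop := ∀ (vec : List Int) (tam : Int), Dom_moverv vec tam → Pre_moverv vec tam → Spec_moverv vec tam (moverv vec tam)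

-- ===== LEMMAS AND PROOFS =====

-- the three segment fills of B, as Nat-indexed List.set folds
def pvG1 (n : Nat) (v : List Int) : List Int :=
  (List.range n).foldl (fun w j => w.set j (3 * (j : Int) + 1)) v
def pvG2 (N n : Nat) (v : List Int) : List Int :=
  (List.range n).foldl (fun w j => w.set (N + j) (3 * (j : Int) + 2)) v
def pvG3 (Q n : Nat) (v : List Int) : List Int :=
  (List.range n).foldl (fun w j => w.set (Q + j) (3 * (j : Int) + 3)) v

lemma set_foldl_comm (l : List Nat) (f : Nat → Nat) (g : Nat → Int) (k : Nat) (a : Int)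
    (h : ∀ j ∈ l, f j ≠ k) (v : List Int) :
    l.foldl (fun w j => w.set (f j) (g j)) (v.set k a)
      = (l.foldl (fun w j => w.set (f j) (g j)) v).set k a := by
  induction l generalizing v with
  | nil => rfl
  | cons x xs ih =>
    simp only [List.foldl_cons]
    rw [List.set_comm _ _ (h x (by simp)).symm, ih (fun j hj => h j (by simp [hj]))]

lemma pvG2_set (N n : Nat) (k : Nat) (a : Int) (hk : ∀ j < n, N + j ≠ k) (v : List Int) :
    pvG2 N n (v.set k a) = (pvG2 N n v).set k a := by
  unfold pvG2
  exact set_foldl_comm (List.range n) (fun j => N + j) _ k a (by simpa using hk) v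

lemma pvG3_set (Q n : Nat) (k : Nat) (a : Int) (hk : ∀ j < n, Q + j ≠ k) (v : List Int) :
    pvG3 Q n (v.set k a) = (pvG3 Q n v).set k a := by
  unfold pvG3
  exact set_foldl_comm (List.range n) (fun j => Q + j) _ k a (by simpa using hk) v

-- invariant of A's interleaved loop: after n iterations the vector carries B's three
-- segment fills restricted to j < n, and counter/pointers hold their closed-form values
lemma mainA (n N Q : Nat) (hn : n ≤ N) (hNQ : 2 * N ≤ Q) (v : List Int) :
    ((List.range n).foldl
      (fun (s : List Int × Int × Int × Int) (k : Nat) =>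
        (PySem.List.pySetD
            (PySem.List.pySetD (PySem.List.pySetD s.1 (k : Int) s.2.1) s.2.2.1 (s.2.1 + 1))
            s.2.2.2 (s.2.1 + 2),
         s.2.1 + 3, s.2.2.1 + 1, s.2.2.2 + 1))
      (v, 1, (N : Int), (Q : Int)))
    = (pvG3 Q n (pvG2 N n (pvG1 n v)), 3 * (n : Int) + 1, ((N + n : Nat) : Int), ((Q + n : Nat) : Int)) := by
  induction n with
  | zero => simp [pvG1, pvG2, pvG3]
  | succ m ih =>
    rw [List.range_succ, List.foldl_append, ih (by omega)]
    simp only [List.foldl_cons, List.foldl_nil]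
    have h1 : ((N + m : Nat) : Int) + 1 = ((N + (m + 1) : Nat) : Int) := by push_cast; ring
    have h2 : ((Q + m : Nat) : Int) + 1 = ((Q + (m + 1) : Nat) : Int) := by push_cast; ring
    have h3 : (3 * (m : Int) + 1) + 3 = 3 * ((m + 1 : Nat) : Int) + 1 := by push_cast; ring
    simp only [PySem.List.pySetD_natCast, h1, h2, h3]
    refine Prod.ext ?_ (by simp)
    have e1 : pvG1 (m + 1) v = (pvG1 m v).set m (3 * (m : Int) + 1) := by
      unfold pvG1; rw [List.range_succ, List.foldl_append]; rfl
    have e2 : ∀ x, pvG2 N (m + 1) x = (pvG2 N m x).set (N + m) (3 * (m : Int) + 2) := by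
      intro x; unfold pvG2; rw [List.range_succ, List.foldl_append]; rfl
    have e3 : ∀ x, pvG3 Q (m + 1) x = (pvG3 Q m x).set (Q + m) (3 * (m : Int) + 3) := by
      intro x; unfold pvG3; rw [List.range_succ, List.foldl_append]; rfl
    show (((pvG3 Q m (pvG2 N m (pvG1 m v))).set m (3 * (m : Int) + 1)).set (N + m)
            (3 * (m : Int) + 1 + 1)).set (Q + m) (3 * (m : Int) + 1 + 2)
        = pvG3 Q (m + 1) (pvG2 N (m + 1) (pvG1 (m + 1) v))
    rw [e1, e2, e3,
        pvG2_set N m m _ (fun j hj => by omega),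
        pvG3_set Q m (N + m) _ (fun j hj => by omega),
        pvG3_set Q m m _ (fun j hj => by omega),
        show (3 * (m : Int) + 1 + 1) = 3 * (m : Int) + 2 from by ring,
        show (3 * (m : Int) + 1 + 2) = 3 * (m : Int) + 3 from by ring]

-- B's three pyRange folds are exactly the pvG segment fills
lemma altB (N Q : Nat) (tam : Int) (hN : PySem.Int.floordiv tam 3 = (N : Int))
    (hQ : tam - (N : Int) = (Q : Int)) (v : List Int) :
    moverv_alt v tam = pvG3 Q N (pvG2 N N (pvG1 N v)) := by
  unfold moverv_alt
  simp only [hN, hQ, PySem.List.pyRange_one, sub_zero, Int.toNat_natCast, List.foldl_map, zero_add]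
  have c1 : ∀ init : List Int,
      (List.range N).foldl (fun w (k : Nat) => PySem.List.pySetD w (k : Int) (3 * (k : Int) + 1)) init
        = pvG1 N init := by
    intro init
    exact PySem.List.foldl_congr_mem _ _ _ _ (fun acc x _ => by
      rw [PySem.List.pySetD_natCast])
  have c2 : ∀ init : List Int,
      (List.range N).foldl (fun w (k : Nat) => PySem.List.pySetD w ((N : Int) + (k : Int)) (3 * (k : Int) + 2)) init
        = pvG2 N N init := by
    intro init
    exact PySem.List.foldl_congr_mem _ _ _ _ (fun acc x _ => by
      rw [show ((N : Int) + (x : Int)) = ((N + x : Nat) : Int) from by push_cast; ring,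
          PySem.List.pySetD_natCast])
  have c3 : ∀ init : List Int,
      (List.range N).foldl (fun w (k : Nat) => PySem.List.pySetD w ((Q : Int) + (k : Int)) (3 * (k : Int) + 3)) init
        = pvG3 Q N init := by
    intro init
    exact PySem.List.foldl_congr_mem _ _ _ _ (fun acc x _ => by
      rw [show ((Q : Int) + (x : Int)) = ((Q + x : Nat) : Int) from by push_cast; ring,
          PySem.List.pySetD_natCast])
  rw [c1, c2, c3]

-- ===== VERDICT (by name: the statement is the Claim_ definition above) =====
theorem moverv_spec : Claim_equal_moverv := by
  intro vec tam _ _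
  unfold Spec_moverv
  by_cases h : PySem.Int.floordiv tam 3 ≤ 0
  · simp only [moverv, moverv_alt, PySem.List.pyRange_one_eq_nil h, List.foldl_nil]
  · have hfp0 : 0 < PySem.Int.floordiv tam 3 := by omega
    have hf : PySem.Int.floordiv tam 3 = tam / 3 :=
      PySem.Int.floordiv_eq_ediv_of_pos (by norm_num)
    have hfp : 0 < tam / 3 := by rw [← hf]; exact hfp0
    obtain ⟨N, hN⟩ : ∃ N : Nat, (N : Int) = tam / 3 :=
      ⟨(tam / 3).toNat, Int.toNat_of_nonneg (by omega)⟩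
    obtain ⟨Q, hQ⟩ : ∃ Q : Nat, (Q : Int) = tam - tam / 3 :=
      ⟨(tam - tam / 3).toNat, Int.toNat_of_nonneg (by omega)⟩
    have hQ' : tam - (N : Int) = (Q : Int) := by rw [hN]; exact hQ.symm
    have hNQ : 2 * N ≤ Q := by omega
    rw [altB N Q tam (by rw [hf, hN]) hQ']
    simp only [moverv, hf, ← hN, hQ', PySem.List.pyRange_one, sub_zero, Int.toNat_natCast,
      List.foldl_map, zero_add]
    rw [mainA N N Q le_rfl hNQ vec]
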